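-- pv_equiv track=rewrite | github.com/SiluPanda/finverification-bench | paper/pairwise_analysis.py | instance_analysis
-- ===== SOURCE A (Python) =====
-- def instance_analysis(models, shared_ids):
--     """Identify universally easy/hard instances and unique strengths."""
--     model_names = list(models.keys())
--     n_models = len(model_names)
--
--     all_correct = []
--     all_wrong = []
--     sonnet4_only = []  # Only Claude Sonnet 4 correct
--     per_instance_correct_count = {}
--
--     for iid in shared_ids:
--         corrects = [m for m in model_names if models[m][iid]["correct"]]
--         wrongs = [m for m in model_names if not models[m][iid]["correct"]]
--         per_instance_correct_count[iid] = len(corrects)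
--
--         if len(corrects) == n_models:
--             all_correct.append(iid)
--         elif len(corrects) == 0:
--             all_wrong.append(iid)
--
--         if (len(corrects) == 1 and corrects[0] == "Claude Sonnet 4"):
--             sonnet4_only.append(iid)
--
--     return all_correct, all_wrong, sonnet4_only, per_instance_correct_count
-- ===== SOURCE B (Python) =====
-- def instance_analysis(models, shared_ids):
--     """Identify universally easy/hard instances and unique strengths.
--
--     Count-table version: one model-major counting pass builds per-instance
--     correct counts and the sole correct model, then one pass over shared_ids
--     classifies each instance from the table.
--     """
--     counts = dict.fromkeys(shared_ids, 0)
--     sole = {}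
--     for name, results in models.items():
--         for iid in counts:
--             if results[iid]["correct"]:
--                 counts[iid] += 1
--                 sole[iid] = name
--     n_models = len(models)
--     all_correct, all_wrong, sonnet4_only = [], [], []
--     for iid in shared_ids:
--         c = counts[iid]
--         if c == n_models:
--             all_correct.append(iid)
--         elif c == 0:
--             all_wrong.append(iid)
--         if c == 1 and sole[iid] == "Claude Sonnet 4":
--             sonnet4_only.append(iid)
--     return all_correct, all_wrong, sonnet4_only, counts
-- ===== Notes on version B (the rewrite author's own statement) =====
-- stated objective: alternative
-- what changed: B replaces A's instance-major pass that materializes a corrects/wrongs model list per instance with a model-major counting pass into a count table plus a sole-correct-model table, followed by a separate classification pass over shared_ids; the dead 'wrongs' list is dropped.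
import Mathlib
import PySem

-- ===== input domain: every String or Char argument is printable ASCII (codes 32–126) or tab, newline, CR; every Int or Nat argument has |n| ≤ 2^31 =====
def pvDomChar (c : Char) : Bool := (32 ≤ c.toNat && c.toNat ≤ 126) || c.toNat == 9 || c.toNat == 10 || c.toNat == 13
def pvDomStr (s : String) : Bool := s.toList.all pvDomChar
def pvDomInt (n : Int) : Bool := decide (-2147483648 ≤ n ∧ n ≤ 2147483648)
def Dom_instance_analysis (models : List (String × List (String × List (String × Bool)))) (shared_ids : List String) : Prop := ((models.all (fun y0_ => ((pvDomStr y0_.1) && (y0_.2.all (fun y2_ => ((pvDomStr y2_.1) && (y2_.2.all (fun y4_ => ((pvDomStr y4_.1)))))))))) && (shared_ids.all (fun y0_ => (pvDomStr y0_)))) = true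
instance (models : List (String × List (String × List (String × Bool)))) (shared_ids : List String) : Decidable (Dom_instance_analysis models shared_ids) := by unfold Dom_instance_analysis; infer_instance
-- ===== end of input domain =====

-- B replaces A's instance-major pass (a corrects/wrongs model list per instance) by a model-major
-- counting pass into a count table and a sole-correct table plus a separate classification pass;
-- same asymptotic cost (objective: alternative decomposition; the dead 'wrongs' list is dropped).

-- the lookup chain models[m][iid]["correct"] that both Pythons contain (the getD defaults are
-- never reached on inputs admitted by Pre_, where every lookup succeeds)
def pvCorrect (results : List (String × List (String × Bool))) (iid : String) : Bool :=
  (PySem.Dict.ofList ((PySem.Dict.ofList results).getD iid [])).getD "correct" false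

-- ===== PORT A =====
def instance_analysis (models : List (String × List (String × List (String × Bool)))) (shared_ids : List String) : List String × List String × List String × (List (String × Int)) :=
  let md := PySem.Dict.ofList models
  let model_names := md.keys
  let n_models : Int := (model_names.length : Int)
  let st := shared_ids.foldl
    (fun (st : List String × List String × List String × PySem.Dict String Int) iid =>
      let corrects := model_names.filter (fun m => pvCorrect (md.getD m []) iid)
      let _wrongs := model_names.filter (fun m => !(pvCorrect (md.getD m []) iid))
      let cnt := st.2.2.2.insert iid (corrects.length : Int)
      let acaw :=
        if (corrects.length : Int) = n_models then (st.1 ++ [iid], st.2.1)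
        else if corrects.length = 0 then (st.1, st.2.1 ++ [iid])
        else (st.1, st.2.1)
      let s4 :=
        if corrects.length = 1 ∧ PySem.List.pyGet? corrects 0 = some "Claude Sonnet 4"
        then st.2.2.1 ++ [iid] else st.2.2.1
      (acaw.1, acaw.2, s4, cnt))
    ([], [], [], PySem.Dict.empty)
  (st.1, st.2.1, st.2.2.1, st.2.2.2.items)

-- ===== PORT B =====
def instance_analysis_alt (models : List (String × List (String × List (String × Bool)))) (shared_ids : List String) : List String × List String × List String × (List (String × Int)) :=
  let counts0 : PySem.Dict String Int :=
    shared_ids.foldl (fun d iid => d.insert iid 0) PySem.Dict.empty   -- dict.fromkeys(shared_ids, 0)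
  let cs := (PySem.Dict.ofList models).items.foldl
    (fun (p : PySem.Dict String Int × PySem.Dict String String) mr =>
      counts0.keys.foldl
        (fun (q : PySem.Dict String Int × PySem.Dict String String) iid =>
          if pvCorrect mr.2 iid then (q.1.modify iid 0 (· + 1), q.2.insert iid mr.1) else q)
        p)
    (counts0, PySem.Dict.empty)
  let counts := cs.1
  let sole := cs.2
  let n_models : Int := ((PySem.Dict.ofList models).size : Int)
  let lists := shared_ids.foldl
    (fun (t : List String × List String × List String) iid =>
      let c := counts.getD iid 0
      let acaw :=
        if c = n_models then (t.1 ++ [iid], t.2.1)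
        else if c = 0 then (t.1, t.2.1 ++ [iid])
        else (t.1, t.2.1)
      let s4 :=
        if c = 1 ∧ sole.get? iid = some "Claude Sonnet 4"
        then t.2.2 ++ [iid] else t.2.2
      (acaw.1, acaw.2, s4))
    ([], [], [])
  (lists.1, lists.2.1, lists.2.2, counts.items)

-- ===== PRECONDITION & SPEC =====
-- Pre_ excludes exactly the inputs where A raises a KeyError: some model's result dict lacks a
-- shared id, or an instance record lacks the "correct" key.
def Pre_instance_analysis (models : List (String × List (String × List (String × Bool)))) (shared_ids : List String) : Prop :=
  ∀ p ∈ (PySem.Dict.ofList models).items, ∀ iid ∈ shared_ids,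
    (((PySem.Dict.ofList p.2).get? iid).bind
      (fun inst => (PySem.Dict.ofList inst).get? "correct")).isSome = true
instance (models : List (String × List (String × List (String × Bool)))) (shared_ids : List String) : Decidable (Pre_instance_analysis models shared_ids) := by unfold Pre_instance_analysis; infer_instance
def pvWitness_instance_analysis : (List (String × List (String × List (String × Bool)))) × List String :=
  ([("Claude Sonnet 4", [("i1", [("correct", true)]), ("i2", [("correct", false)])]),
    ("GPT-5", [("i1", [("correct", false)]), ("i2", [("correct", false)])])],
   ["i1", "i2"])

def Spec_instance_analysis (models : List (String × List (String × List (String × Bool)))) (shared_ids : List String) (out : List String × List String × List String × (List (String × Int))) : Prop := out = instance_analysis_alt models shared_ids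
instance (models : List (String × List (String × List (String × Bool)))) (shared_ids : List String) (out : List String × List String × List String × (List (String × Int))) : Decidable (Spec_instance_analysis models shared_ids out) := by unfold Spec_instance_analysis; infer_instance

-- ===== CLAIM (what is proved, stated in full; the proofs are below) =====
def Claim_equal_instance_analysis : Prop := ∀ (models : List (String × List (String × List (String × Bool)))) (shared_ids : List String), Dom_instance_analysis models shared_ids → Pre_instance_analysis models shared_ids → Spec_instance_analysis models shared_ids (instance_analysis models shared_ids)

-- ===== LEMMAS AND PROOFS =====

-- filtering the key list of a nodup-key association list through a lookup = filtering the pairs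
theorem pv_filter_keys {B : Type} (L : List (String × B)) (f : B → Bool) (dflt : B)
    (h : (L.map Prod.fst).Nodup) :
    (L.map Prod.fst).filter (fun m => f ((PySem.Dict.mk L).getD m dflt))
      = (L.filter (fun p => f p.2)).map Prod.fst := by
  induction L with
  | nil => rfl
  | cons p t ih =>
    obtain ⟨k, v⟩ := p
    simp only [List.map_cons, List.nodup_cons] at h
    simp only [List.map_cons, List.filter_cons]
    have hhead : f ((PySem.Dict.mk ((k, v) :: t)).getD k dflt) = f v := by
      simp [PySem.Dict.getD, PySem.Dict.get?_mk_cons]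
    have htail : (t.map Prod.fst).filter
        (fun m => f ((PySem.Dict.mk ((k, v) :: t)).getD m dflt))
        = (t.map Prod.fst).filter (fun m => f ((PySem.Dict.mk t).getD m dflt)) := by
      apply List.filter_congr
      intro m hm
      have hne : ¬ (k == m) = true := by
        simp only [beq_iff_eq]
        intro he; exact h.1 (he ▸ hm)
      simp [PySem.Dict.getD, PySem.Dict.get?_mk_cons, hne]
    rw [hhead, htail, ih h.2]
    by_cases hf : f v <;> simp [hf]

-- a fold of pure-valued inserts: the stored value is f of the key
theorem pv_getD_foldl_insert_fun (l : List String) (f : String → Int)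
    (d : PySem.Dict String Int) (k : String) :
    (l.foldl (fun d x => d.insert x (f x)) d).getD k 0
      = if k ∈ l then f k else d.getD k 0 := by
  induction l generalizing d with
  | nil => simp
  | cons x t ih =>
    simp only [List.foldl_cons, ih, PySem.Dict.getD_insert, List.mem_cons]
    by_cases hkt : k ∈ t <;> by_cases hkx : k = x <;> simp [hkt, hkx]

-- the inner (per-model) pass of B over the nodup key list ks: effect on counts
theorem pv_inner_counts (v : List (String × List (String × Bool))) (name : String)
    (ks : List String) (hnd : ks.Nodup)
    (q : PySem.Dict String Int × PySem.Dict String String) (iid : String) :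
    ((ks.foldl
        (fun (q : PySem.Dict String Int × PySem.Dict String String) i =>
          if pvCorrect v i then (q.1.modify i 0 (· + 1), q.2.insert i name) else q) q).1.getD iid 0)
      = if iid ∈ ks ∧ pvCorrect v iid then q.1.getD iid 0 + 1 else q.1.getD iid 0 := by
  induction ks generalizing q with
  | nil => simp
  | cons x t ih =>
    have hx := (List.nodup_cons.mp hnd).1
    simp only [List.foldl_cons, ih (List.nodup_cons.mp hnd).2, List.mem_cons]
    by_cases hc : pvCorrect v x <;> by_cases hi : iid = x <;>
      simp [hc, hi, PySem.Dict.getD_modify, hx]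

-- the inner pass: effect on sole
theorem pv_inner_sole (v : List (String × List (String × Bool))) (name : String)
    (ks : List String) (hnd : ks.Nodup)
    (q : PySem.Dict String Int × PySem.Dict String String) (iid : String) :
    ((ks.foldl
        (fun (q : PySem.Dict String Int × PySem.Dict String String) i =>
          if pvCorrect v i then (q.1.modify i 0 (· + 1), q.2.insert i name) else q) q).2.get? iid)
      = if iid ∈ ks ∧ pvCorrect v iid then some name else q.2.get? iid := by
  induction ks generalizing q with
  | nil => simp
  | cons x t ih =>
    have hx := (List.nodup_cons.mp hnd).1
    simp only [List.foldl_cons, ih (List.nodup_cons.mp hnd).2, List.mem_cons]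
    by_cases hc : pvCorrect v x <;> by_cases hi : iid = x <;>
      simp [hc, hi, PySem.Dict.get?_insert, hx]

-- the inner pass: keys of counts are unchanged when every touched key is present
theorem pv_inner_keys (v : List (String × List (String × Bool))) (name : String)
    (ks : List String) (q : PySem.Dict String Int × PySem.Dict String String)
    (hsub : ∀ i ∈ ks, i ∈ q.1.keys) :
    ((ks.foldl
        (fun (q : PySem.Dict String Int × PySem.Dict String String) i =>
          if pvCorrect v i then (q.1.modify i 0 (· + 1), q.2.insert i name) else q) q).1.keys)
      = q.1.keys := by
  induction ks generalizing q with
  | nil => rfl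
  | cons x t ih =>
    have hxk : q.1.contains x = true :=
      (PySem.Dict.contains_iff_mem_keys _ _).mpr (hsub x (by simp))
    by_cases hc : pvCorrect v x
    · have hkeys : ((q.1.modify x 0 (· + 1), q.2.insert x name) :
          PySem.Dict String Int × PySem.Dict String String).1.keys = q.1.keys := by
        simp [PySem.Dict.modify, PySem.Dict.keys_insert_of_contains _ _ hxk]
      simp only [List.foldl_cons, hc, if_true]
      rw [ih _ (fun i hi => by rw [hkeys]; exact hsub i (by simp [hi])), hkeys]
    · simp only [List.foldl_cons, hc]
      exact ih q (fun i hi => hsub i (by simp [hi]))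

-- the outer (model-major) pass of B: counts accumulate the per-instance correct count
theorem pv_outer_counts (L : List (String × List (String × List (String × Bool))))
    (ks : List String) (hnd : ks.Nodup)
    (q : PySem.Dict String Int × PySem.Dict String String) (iid : String) (hiid : iid ∈ ks) :
    ((L.foldl
        (fun (p : PySem.Dict String Int × PySem.Dict String String) mr =>
          ks.foldl
            (fun (q : PySem.Dict String Int × PySem.Dict String String) i =>
              if pvCorrect mr.2 i then (q.1.modify i 0 (· + 1), q.2.insert i mr.1) else q) p) q).1.getD iid 0)
      = q.1.getD iid 0 + ((L.filter (fun p => pvCorrect p.2 iid)).length : Int) := by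
  induction L using List.reverseRecOn with
  | nil => simp
  | append_singleton t p ih =>
    rw [List.foldl_append]
    simp only [List.foldl_cons, List.foldl_nil]
    rw [pv_inner_counts p.2 p.1 ks hnd _ iid, ih]
    by_cases hc : pvCorrect p.2 iid <;> (simp [hc, hiid, List.filter_append]; try ring)

-- the outer pass: sole holds the last correct model (if any)
theorem pv_outer_sole (L : List (String × List (String × List (String × Bool))))
    (ks : List String) (hnd : ks.Nodup)
    (q : PySem.Dict String Int × PySem.Dict String String) (iid : String) (hiid : iid ∈ ks) :
    ((L.foldl
        (fun (p : PySem.Dict String Int × PySem.Dict String String) mr =>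
          ks.foldl
            (fun (q : PySem.Dict String Int × PySem.Dict String String) i =>
              if pvCorrect mr.2 i then (q.1.modify i 0 (· + 1), q.2.insert i mr.1) else q) p) q).2.get? iid)
      = (((L.filter (fun p => pvCorrect p.2 iid)).map Prod.fst).getLast?).or (q.2.get? iid) := by
  induction L using List.reverseRecOn with
  | nil => simp
  | append_singleton t p ih =>
    rw [List.foldl_append]
    simp only [List.foldl_cons, List.foldl_nil]
    rw [pv_inner_sole p.2 p.1 ks hnd _ iid]
    by_cases hc : pvCorrect p.2 iid <;> simp [hc, hiid, List.filter_append, ih]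

-- the outer pass: keys of counts are unchanged
theorem pv_outer_keys (L : List (String × List (String × List (String × Bool))))
    (ks : List String) (q : PySem.Dict String Int × PySem.Dict String String)
    (hsub : ∀ i ∈ ks, i ∈ q.1.keys) :
    ((L.foldl
        (fun (p : PySem.Dict String Int × PySem.Dict String String) mr =>
          ks.foldl
            (fun (q : PySem.Dict String Int × PySem.Dict String String) i =>
              if pvCorrect mr.2 i then (q.1.modify i 0 (· + 1), q.2.insert i mr.1) else q) p) q).1.keys)
      = q.1.keys := by
  induction L using List.reverseRecOn with
  | nil => rfl
  | append_singleton t p ih =>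
    rw [List.foldl_append]
    simp only [List.foldl_cons, List.foldl_nil]
    rw [pv_inner_keys p.2 p.1 ks _ (fun i hi => by rw [ih]; exact hsub i hi), ih]

-- an if/elif chain over a pair, split into componentwise ifs
theorem pv_pair_ifchain {A B : Type} (C1 C2 : Prop) [Decidable C1] [Decidable C2]
    (a a' : A) (b b' : B) :
    (if C1 then (a', b) else if C2 then (a, b') else (a, b))
      = (if C1 then a' else a, if ¬ C1 ∧ C2 then b' else b) := by
  by_cases h1 : C1 <;> by_cases h2 : C2 <;> simp [h1, h2]

-- a fold whose step updates the four components independently is four folds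
theorem pv_foldl_split4 {I A B C D : Type} (l : List I)
    (f : A × B × C × D → I → A × B × C × D)
    (g1 : A → I → A) (g2 : B → I → B) (g3 : C → I → C) (g4 : D → I → D)
    (h : ∀ x ∈ l, ∀ a b c d, f (a, b, c, d) x = (g1 a x, g2 b x, g3 c x, g4 d x))
    (a : A) (b : B) (c : C) (d : D) :
    l.foldl f (a, b, c, d) = (l.foldl g1 a, l.foldl g2 b, l.foldl g3 c, l.foldl g4 d) := by
  induction l generalizing a b c d with
  | nil => rfl
  | cons x t ih =>
    simp only [List.foldl_cons, h x (by simp)]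
    exact ih (fun y hy => h y (by simp [hy])) _ _ _ _

-- a fold whose step updates the three components independently is three folds
theorem pv_foldl_split3 {I A B C : Type} (l : List I)
    (f : A × B × C → I → A × B × C)
    (g1 : A → I → A) (g2 : B → I → B) (g3 : C → I → C)
    (h : ∀ x ∈ l, ∀ a b c, f (a, b, c) x = (g1 a x, g2 b x, g3 c x))
    (a : A) (b : B) (c : C) :
    l.foldl f (a, b, c) = (l.foldl g1 a, l.foldl g2 b, l.foldl g3 c) := by
  induction l generalizing a b c with
  | nil => rfl
  | cons x t ih =>
    simp only [List.foldl_cons, h x (by simp)]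
    exact ih (fun y hy => h y (by simp [hy])) _ _ _

-- proof-side abbreviations for the pieces of the two ports
def pvMd (models : List (String × List (String × List (String × Bool)))) :
    PySem.Dict String (List (String × List (String × Bool))) := PySem.Dict.ofList models

def pvCorrA (models : List (String × List (String × List (String × Bool)))) (iid : String) :
    List String :=
  (pvMd models).keys.filter (fun m => pvCorrect ((pvMd models).getD m []) iid)

def pvKs0 (shared_ids : List String) : PySem.Dict String Int :=
  shared_ids.foldl (fun d i => d.insert i 0) PySem.Dict.empty

def pvPass (models : List (String × List (String × List (String × Bool))))
    (shared_ids : List String) : PySem.Dict String Int × PySem.Dict String String :=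
  (PySem.Dict.ofList models).items.foldl
    (fun (p : PySem.Dict String Int × PySem.Dict String String) mr =>
      (pvKs0 shared_ids).keys.foldl
        (fun (q : PySem.Dict String Int × PySem.Dict String String) iid =>
          if pvCorrect mr.2 iid then (q.1.modify iid 0 (· + 1), q.2.insert iid mr.1) else q)
        p)
    (pvKs0 shared_ids, PySem.Dict.empty)

-- port A as four independent folds
theorem pv_A_eq (models : List (String × List (String × List (String × Bool))))
    (shared_ids : List String) :
    instance_analysis models shared_ids =
      (shared_ids.foldl (fun a x =>
          if ((pvCorrA models x).length : Int) = ((pvMd models).keys.length : Int)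
          then a ++ [x] else a) [],
       shared_ids.foldl (fun b x =>
          if ¬ ((pvCorrA models x).length : Int) = ((pvMd models).keys.length : Int) ∧
              (pvCorrA models x).length = 0
          then b ++ [x] else b) [],
       shared_ids.foldl (fun c x =>
          if (pvCorrA models x).length = 1 ∧
              PySem.List.pyGet? (pvCorrA models x) 0 = some "Claude Sonnet 4"
          then c ++ [x] else c) [],
       (shared_ids.foldl (fun d x => d.insert x ((pvCorrA models x).length : Int))
          PySem.Dict.empty).items) := by
  simp only [instance_analysis]
  unfold pvCorrA pvMd
  rw [pv_foldl_split4 shared_ids _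
    (fun a x => if (((PySem.Dict.ofList models).keys.filter
        (fun m => pvCorrect ((PySem.Dict.ofList models).getD m []) x)).length : Int)
        = ((PySem.Dict.ofList models).keys.length : Int) then a ++ [x] else a)
    (fun b x => if ¬ (((PySem.Dict.ofList models).keys.filter
        (fun m => pvCorrect ((PySem.Dict.ofList models).getD m []) x)).length : Int)
        = ((PySem.Dict.ofList models).keys.length : Int) ∧
        ((PySem.Dict.ofList models).keys.filter
        (fun m => pvCorrect ((PySem.Dict.ofList models).getD m []) x)).length = 0
        then b ++ [x] else b)
    (fun c x => if ((PySem.Dict.ofList models).keys.filter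
        (fun m => pvCorrect ((PySem.Dict.ofList models).getD m []) x)).length = 1 ∧
        PySem.List.pyGet? ((PySem.Dict.ofList models).keys.filter
        (fun m => pvCorrect ((PySem.Dict.ofList models).getD m []) x)) 0
          = some "Claude Sonnet 4"
        then c ++ [x] else c)
    (fun d x => d.insert x ((((PySem.Dict.ofList models).keys.filter
        (fun m => pvCorrect ((PySem.Dict.ofList models).getD m []) x)).length : Int)) )]
  · intro x _ a b c d
    dsimp only
    rw [pv_pair_ifchain]

-- port B as three independent folds over the result of the model-major pass
theorem pv_B_eq (models : List (String × List (String × List (String × Bool))))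
    (shared_ids : List String) :
    instance_analysis_alt models shared_ids =
      (shared_ids.foldl (fun a x =>
          if (pvPass models shared_ids).1.getD x 0 = (((PySem.Dict.ofList models).size : Nat) : Int)
          then a ++ [x] else a) [],
       shared_ids.foldl (fun b x =>
          if ¬ (pvPass models shared_ids).1.getD x 0 = (((PySem.Dict.ofList models).size : Nat) : Int) ∧
              (pvPass models shared_ids).1.getD x 0 = 0
          then b ++ [x] else b) [],
       shared_ids.foldl (fun c x =>
          if (pvPass models shared_ids).1.getD x 0 = 1 ∧
              (pvPass models shared_ids).2.get? x = some "Claude Sonnet 4"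
          then c ++ [x] else c) [],
       (pvPass models shared_ids).1.items) := by
  simp only [instance_analysis_alt]
  unfold pvPass pvKs0
  rw [pv_foldl_split3 shared_ids]
  · intro x _ a b c
    dsimp only
    rw [pv_pair_ifchain]

-- membership in the key list of the fromkeys dict
theorem pv_mem_ks (shared_ids : List String) (x : String) :
    x ∈ (pvKs0 shared_ids).keys ↔ x ∈ shared_ids := by
  unfold pvKs0
  rw [PySem.Dict.keys_foldl_insert shared_ids (fun _ _ => (0 : Int)) PySem.Dict.empty]
  simp [PySem.Dict.keys_empty, PySem.Set.update_nil_left, PySem.Set.mem_ofList]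

theorem pv_ks_nodup (shared_ids : List String) : (pvKs0 shared_ids).keys.Nodup := by
  unfold pvKs0
  exact PySem.Dict.nodup_keys_foldl_insert shared_ids (fun _ _ => (0 : Int)) _ (by simp)

-- A's per-instance corrects list is the filtered pair list of the model dict
theorem pv_corrA_eq (models : List (String × List (String × List (String × Bool)))) (x : String) :
    pvCorrA models x
      = ((PySem.Dict.ofList models).items.filter (fun p => pvCorrect p.2 x)).map Prod.fst := by
  have hnd : ((PySem.Dict.ofList models).items.map Prod.fst).Nodup :=
    PySem.Dict.nodup_keys_ofList models
  exact pv_filter_keys (PySem.Dict.ofList models).items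
    (fun v => pvCorrect v x) [] hnd

-- B's count table holds A's per-instance correct count
theorem pv_count_eq (models : List (String × List (String × List (String × Bool))))
    (shared_ids : List String) (x : String) (hx : x ∈ shared_ids) :
    (pvPass models shared_ids).1.getD x 0 = ((pvCorrA models x).length : Int) := by
  unfold pvPass
  rw [pv_outer_counts _ _ (pv_ks_nodup shared_ids) _ x ((pv_mem_ks shared_ids x).mpr hx)]
  have h0 : (pvKs0 shared_ids).getD x 0 = 0 := by
    unfold pvKs0
    rw [pv_getD_foldl_insert_fun shared_ids (fun _ => 0)]
    split <;> simp
  rw [show ((pvKs0 shared_ids, PySem.Dict.empty) :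
      PySem.Dict String Int × PySem.Dict String String).1.getD x 0
      = (pvKs0 shared_ids).getD x 0 from rfl, h0, pv_corrA_eq, List.length_map]
  ring

-- B's sole table holds the last correct model
theorem pv_sole_eq (models : List (String × List (String × List (String × Bool))))
    (shared_ids : List String) (x : String) (hx : x ∈ shared_ids) :
    (pvPass models shared_ids).2.get? x
      = (((PySem.Dict.ofList models).items.filter
            (fun p => pvCorrect p.2 x)).map Prod.fst).getLast? := by
  unfold pvPass
  rw [pv_outer_sole _ _ (pv_ks_nodup shared_ids) _ x ((pv_mem_ks shared_ids x).mpr hx)]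
  simp [PySem.Dict.get?_empty]

-- size of the model dict = number of model names
theorem pv_size_eq (models : List (String × List (String × List (String × Bool)))) :
    (((PySem.Dict.ofList models).size : Nat) : Int) = ((pvMd models).keys.length : Int) := by
  simp [PySem.Dict.size, PySem.Dict.keys, pvMd]

-- the sonnet4 conditions of the two ports agree
theorem pv_s4_iff (models : List (String × List (String × List (String × Bool))))
    (shared_ids : List String) (x : String) (hx : x ∈ shared_ids) :
    ((pvPass models shared_ids).1.getD x 0 = 1 ∧
      (pvPass models shared_ids).2.get? x = some "Claude Sonnet 4")
    ↔ ((pvCorrA models x).length = 1 ∧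
      PySem.List.pyGet? (pvCorrA models x) 0 = some "Claude Sonnet 4") := by
  rw [pv_count_eq models shared_ids x hx, pv_sole_eq models shared_ids x hx, ← pv_corrA_eq]
  by_cases hl : (pvCorrA models x).length = 1
  · obtain ⟨aa, ha⟩ := List.length_eq_one_iff.mp hl
    rw [ha]
    simp [PySem.List.pyGet?, PySem.List.pyIdx?]
  · have : ¬ ((pvCorrA models x).length : Int) = 1 := by exact_mod_cast hl
    simp [hl, this]

-- the two count dicts have literally equal item lists
theorem pv_items_eq (models : List (String × List (String × List (String × Bool))))
    (shared_ids : List String) :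
    (pvPass models shared_ids).1.items
      = (shared_ids.foldl (fun d x => d.insert x ((pvCorrA models x).length : Int))
          PySem.Dict.empty).items := by
  have hkeysB : (pvPass models shared_ids).1.keys = (pvKs0 shared_ids).keys := by
    unfold pvPass
    exact pv_outer_keys _ _ _ (fun i hi => hi)
  have hkeysA : (shared_ids.foldl (fun d x => d.insert x ((pvCorrA models x).length : Int))
      PySem.Dict.empty).keys = (pvKs0 shared_ids).keys := by
    rw [PySem.Dict.keys_foldl_insert shared_ids
          (fun _ x => ((pvCorrA models x).length : Int)) PySem.Dict.empty]
    unfold pvKs0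
    rw [PySem.Dict.keys_foldl_insert shared_ids (fun _ _ => (0 : Int)) PySem.Dict.empty]
  rw [PySem.Dict.items_eq_map_keys _ (hkeysB ▸ pv_ks_nodup shared_ids) 0,
      PySem.Dict.items_eq_map_keys _ (hkeysA ▸ pv_ks_nodup shared_ids) 0,
      hkeysA, hkeysB]
  apply List.map_congr_left
  intro k hk
  have hks : k ∈ shared_ids := (pv_mem_ks shared_ids k).mp hk
  rw [pv_count_eq models shared_ids k hks,
      pv_getD_foldl_insert_fun shared_ids (fun x => ((pvCorrA models x).length : Int)), if_pos hks]

-- ===== VERDICT (by name: the statement is the Claim_ definition above) =====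
theorem instance_analysis_spec : Claim_equal_instance_analysis := by
  intro models shared_ids _ _
  unfold Spec_instance_analysis
  rw [pv_A_eq, pv_B_eq]
  simp only [Prod.mk.injEq]
  refine ⟨?_, ?_, ?_, ?_⟩
  · apply PySem.List.foldl_congr_mem
    intro acc x hx
    rw [pv_count_eq models shared_ids x hx, pv_size_eq]
  · apply PySem.List.foldl_congr_mem
    intro acc x hx
    rw [pv_count_eq models shared_ids x hx, pv_size_eq]
    refine if_congr (and_congr Iff.rfl ?_) rfl rfl
    exact_mod_cast Iff.rfl
  · apply PySem.List.foldl_congr_mem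
    intro acc x hx
    exact if_congr (pv_s4_iff models shared_ids x hx).symm rfl rfl
  · exact (pv_items_eq models shared_ids).symm
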